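-- pv_equiv track=rewrite | github.com/doudoukiss/reachy_mini_conversation_app | references/Blink-AI-dou/src/embodied_stack/brain/shift_supervisor.py | expand_day_range
-- ===== SOURCE A (Python) =====
-- DAY_NAMES = {
--     "monday": 0,
--     "tuesday": 1,
--     "wednesday": 2,
--     "thursday": 3,
--     "friday": 4,
--     "saturday": 5,
--     "sunday": 6,
-- }
--
-- def expand_day_range(start_name: str, end_name: str) -> list[int]:
--     if start_name not in DAY_NAMES or end_name not in DAY_NAMES:
--         return []
--     start = DAY_NAMES[start_name]
--     end = DAY_NAMES[end_name]
--     days: list[int] = [start]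
--     while days[-1] != end:
--         days.append((days[-1] + 1) % 7)
--         if len(days) > 7:
--             return []
--     return days
-- ===== SOURCE B (Python) =====
-- DAY_NAMES = {
--     "monday": 0,
--     "tuesday": 1,
--     "wednesday": 2,
--     "thursday": 3,
--     "friday": 4,
--     "saturday": 5,
--     "sunday": 6,
-- }
--
-- def expand_day_range(start_name: str, end_name: str) -> list[int]:
--     if start_name not in DAY_NAMES or end_name not in DAY_NAMES:
--         return []
--     start = DAY_NAMES[start_name]
--     end = DAY_NAMES[end_name]
--     count = (end - start) % 7 + 1
--     return [(start + i) % 7 for i in range(count)]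
-- ===== Notes on version B (the rewrite author's own statement) =====
-- stated objective: simpler
-- what changed: Replaced the append-until-end while loop (with its unreachable len>7 bailout) by a closed-form count ((end-start)%7+1) and a single comprehension generating the indices.
import Mathlib
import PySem

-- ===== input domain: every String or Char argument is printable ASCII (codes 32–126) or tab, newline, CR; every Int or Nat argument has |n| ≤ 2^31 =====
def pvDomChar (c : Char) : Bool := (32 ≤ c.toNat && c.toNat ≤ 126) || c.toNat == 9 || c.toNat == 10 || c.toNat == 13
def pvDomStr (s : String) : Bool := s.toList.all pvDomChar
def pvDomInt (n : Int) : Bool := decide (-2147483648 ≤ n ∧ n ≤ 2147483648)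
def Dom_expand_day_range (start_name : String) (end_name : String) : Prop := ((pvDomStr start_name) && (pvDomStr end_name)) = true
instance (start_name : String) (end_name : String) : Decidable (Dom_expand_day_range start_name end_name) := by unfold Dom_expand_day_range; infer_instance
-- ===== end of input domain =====

-- B replaces A's append-until-end while loop (with its unreachable len>7 bailout) by a
-- closed-form count (end-start)%7+1 and one generating pass (objective: simpler).

-- ===== PORT A =====
def DAY_NAMES : PySem.Dict String Int :=
  PySem.Dict.mk [("monday", 0), ("tuesday", 1), ("wednesday", 2), ("thursday", 3),
                 ("friday", 4), ("saturday", 5), ("sunday", 6)]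

-- the while loop of A; fuel 8 is a totality device only: the loop body itself returns []
-- as soon as the list would exceed length 7, so at most 7 iterations ever run.
def pvLoopA : Nat → Int → List Int → List Int
  | 0, _, days => days
  | fuel + 1, endd, days =>
    match PySem.List.pyGet? days (-1) with
    | none => []
    | some last =>
      if last = endd then days
      else
        let days' := days ++ [PySem.Int.mod (last + 1) 7]
        if days'.length > 7 then []
        else pvLoopA fuel endd days'

def expand_day_range (start_name : String) (end_name : String) : List Int :=
  match DAY_NAMES.get? start_name, DAY_NAMES.get? end_name with
  | some start, some endd => pvLoopA 8 endd [start]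
  | _, _ => []

-- ===== PORT B =====
def pvDayNamesB : PySem.Dict String Int :=
  PySem.Dict.mk [("monday", 0), ("tuesday", 1), ("wednesday", 2), ("thursday", 3),
                 ("friday", 4), ("saturday", 5), ("sunday", 6)]

def expand_day_range_alt (start_name : String) (end_name : String) : List Int :=
  (pvDayNamesB.get? start_name).elim [] fun start =>
    (pvDayNamesB.get? end_name).elim [] fun endd =>
      let count := PySem.Int.mod (endd - start) 7 + 1
      (PySem.List.pyRange 0 count 1).map (fun i => PySem.Int.mod (start + i) 7)

-- ===== PRECONDITION & SPEC =====
def Spec_expand_day_range (start_name : String) (end_name : String) (out : List Int) : Prop := out = expand_day_range_alt start_name end_name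
instance (start_name : String) (end_name : String) (out : List Int) : Decidable (Spec_expand_day_range start_name end_name out) := by unfold Spec_expand_day_range; infer_instance

-- ===== CLAIM (what is proved, stated in full; the proofs are below) =====
def Claim_equal_expand_day_range : Prop := ∀ (start_name : String) (end_name : String), Dom_expand_day_range start_name end_name → Spec_expand_day_range start_name end_name (expand_day_range start_name end_name)

-- ===== LEMMAS AND PROOFS =====

-- B's copy of the literal dict looks up identically to A's
theorem pvDayNamesB_get?_eq (t : String) : pvDayNamesB.get? t = DAY_NAMES.get? t := rfl

-- every lookup in the literal dict is none or some k with 0 ≤ k < 7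
theorem pv_lookup_cases (s : String) :
    DAY_NAMES.get? s = none ∨ ∃ k : Int, DAY_NAMES.get? s = some k ∧ 0 ≤ k ∧ k < 7 := by
  simp only [DAY_NAMES, PySem.Dict.get?_mk_cons]
  split_ifs <;> first
    | (right; exact ⟨_, rfl, by norm_num⟩)
    | (left; rfl)

-- the loop agrees with the closed form on every pair of day indices
theorem pv_core_eq (st en : Int) (hs0 : 0 ≤ st) (hs1 : st < 7) (he0 : 0 ≤ en) (he1 : en < 7) :
    pvLoopA 8 en [st] =
      (PySem.List.pyRange 0 (PySem.Int.mod (en - st) 7 + 1) 1).map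
        (fun i => PySem.Int.mod (st + i) 7) := by
  interval_cases st <;> interval_cases en <;> decide

-- ===== VERDICT (by name: the statement is the Claim_ definition above) =====
theorem expand_day_range_spec : Claim_equal_expand_day_range := by
  intro s e _
  unfold Spec_expand_day_range expand_day_range expand_day_range_alt
  rw [pvDayNamesB_get?_eq, pvDayNamesB_get?_eq]
  rcases pv_lookup_cases s with hs | ⟨st, hs, hs0, hs1⟩ <;>
    rcases pv_lookup_cases e with he | ⟨en, he, he0, he1⟩ <;>
    simp only [hs, he, Option.elim]
  exact pv_core_eq st en hs0 hs1 he0 he1
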